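-- pv_equiv track=rewrite | github.com/dutt9145/alshi-flywheel-v2 | shared/mlb_stats_fetcher.py | _kalshi_last_name_matches
-- ===== SOURCE A (Python) =====
-- import unicodedata
--
-- def _normalize_name(s: str) -> str:
--     """Strip diacritics and punctuation, uppercase, remove non-letters.
--
--     'José Ramírez Jr.' → 'JOSERAMIREZJR'
--     """
--     # Decompose unicode, drop combining marks
--     nfd = unicodedata.normalize("NFD", s)
--     ascii_only = "".join(c for c in nfd if unicodedata.category(c) != "Mn")
--     # Keep only letters, uppercase
--     return "".join(c for c in ascii_only.upper() if c.isalpha())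
--
-- def _kalshi_last_name_matches(kalshi_last: str, mlb_last: str) -> bool:
--     """Compare Kalshi's stripped-diacritic last name to an MLB full last name.
--
--     Kalshi strips diacritics AND sometimes drops the letter that had the
--     accent (RAMÍREZ → RAMREZ, RODRÍGUEZ → RODRGUEZ). We handle both cases.
--     """
--     k = _normalize_name(kalshi_last)
--     m = _normalize_name(mlb_last)
--
--     if k == m:
--         return True
--
--     # Kalshi version is often a subsequence of the MLB version (missing
--     # the accented vowel). Check: is k a subsequence of m with at most
--     # 1 letter missing?
--     if len(m) - len(k) == 1:
--         # Try dropping each position in m and see if it matches k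
--         for i in range(len(m)):
--             if m[:i] + m[i+1:] == k:
--                 return True
--
--     return False
-- ===== SOURCE B (Python) =====
-- import unicodedata
--
-- def _normalize_name(s: str) -> str:
--     """Strip diacritics and punctuation, uppercase, remove non-letters."""
--     nfd = unicodedata.normalize("NFD", s)
--     ascii_only = "".join(c for c in nfd if unicodedata.category(c) != "Mn")
--     return "".join(c for c in ascii_only.upper() if c.isalpha())
--
-- def _kalshi_last_name_matches(kalshi_last: str, mlb_last: str) -> bool:
--     k = _normalize_name(kalshi_last)
--     m = _normalize_name(mlb_last)
--
--     if k == m: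
--         return True
--     if len(m) - len(k) != 1:
--         return False
--     # Two-pointer: skip the common prefix, spend the single allowed deletion
--     # at the first mismatch, then the suffixes must agree exactly.
--     i = 0
--     while i < len(k) and k[i] == m[i]:
--         i += 1
--     return k[i:] == m[i + 1:]
-- ===== Notes on version B (the rewrite author's own statement) =====
-- stated objective: simpler
-- what changed: Replaces A's try-every-deletion-position loop (rebuilding m[:i]+m[i+1:] for each i) with a single two-pointer scan that skips the common prefix, spends the one allowed deletion at the first mismatch, and compares the remaining suffixes once.
import Mathlib
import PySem

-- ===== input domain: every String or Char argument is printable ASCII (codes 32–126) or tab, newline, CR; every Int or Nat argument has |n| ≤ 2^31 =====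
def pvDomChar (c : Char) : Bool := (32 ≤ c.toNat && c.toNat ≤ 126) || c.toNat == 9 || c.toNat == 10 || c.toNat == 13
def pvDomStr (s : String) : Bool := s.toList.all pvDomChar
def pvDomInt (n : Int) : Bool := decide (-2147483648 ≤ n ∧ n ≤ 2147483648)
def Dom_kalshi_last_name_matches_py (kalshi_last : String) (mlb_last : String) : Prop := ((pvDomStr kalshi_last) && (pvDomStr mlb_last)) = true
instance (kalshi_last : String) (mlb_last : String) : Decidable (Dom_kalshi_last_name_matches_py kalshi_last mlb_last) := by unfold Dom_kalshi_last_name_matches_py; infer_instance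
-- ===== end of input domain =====

-- B replaces A's try-each-deletion-position loop (O(L) slice rebuilds) by a single
-- two-pointer scan with one allowed deletion; objective: simpler/alternative.

-- ===== PORT A =====
-- _normalize_name: on the ASCII domain, NFD normalisation is the identity and no ASCII
-- character has category 'Mn', so the helper is exactly upper-case-then-keep-letters
-- (exact on Dom; shared verbatim by both Pythons, hence by both ports).
def pvNormalize (s : String) : List Char :=
  (PySem.Chars.upper s.toList).filter PySem.Chars.isalpha

def kalshi_last_name_matches_py (kalshi_last : String) (mlb_last : String) : Bool :=
  let k := pvNormalize kalshi_last
  let m := pvNormalize mlb_last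
  if k == m then true
  else if PySem.List.len m - PySem.List.len k == 1 then
    -- for i in range(len(m)): if m[:i] + m[i+1:] == k: return True
    (PySem.List.pyRange 0 (PySem.List.len m) 1).any (fun i =>
      PySem.List.slice m none (some i) ++ PySem.List.slice m (some (i + 1)) none == k)
  else false

-- ===== PORT B =====
-- the while loop of Source B (skip equal prefix) fused with its final suffix comparison:
-- on the first mismatch the deletion is spent and k[i:] must equal m[i+1:]
def pvScanB : List Char → List Char → Bool
  | a :: ks, b :: ms => if a == b then pvScanB ks ms else (a :: ks) == ms
  | k, m => k == m.drop 1

def kalshi_last_name_matches_py_alt (kalshi_last : String) (mlb_last : String) : Bool :=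
  let k := pvNormalize kalshi_last
  let m := pvNormalize mlb_last
  if k == m then true
  else if PySem.List.len m - PySem.List.len k != 1 then false
  else pvScanB k m

-- ===== PRECONDITION & SPEC =====
def Spec_kalshi_last_name_matches_py (kalshi_last : String) (mlb_last : String) (out : Bool) : Prop := out = kalshi_last_name_matches_py_alt kalshi_last mlb_last
instance (kalshi_last : String) (mlb_last : String) (out : Bool) : Decidable (Spec_kalshi_last_name_matches_py kalshi_last mlb_last out) := by unfold Spec_kalshi_last_name_matches_py; infer_instance

-- ===== CLAIM (what is proved, stated in full; the proofs are below) =====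
def Claim_equal_kalshi_last_name_matches_py : Prop := ∀ (kalshi_last : String) (mlb_last : String), Dom_kalshi_last_name_matches_py kalshi_last mlb_last → Spec_kalshi_last_name_matches_py kalshi_last mlb_last (kalshi_last_name_matches_py kalshi_last mlb_last)

-- ===== LEMMAS AND PROOFS =====

-- A's deletion loop, as a proposition over plain lists
lemma pvDel_iff_scan (k m : List Char) (h : m.length = k.length + 1) :
    (∃ i < m.length, m.take i ++ m.drop (i + 1) = k) ↔ pvScanB k m = true := by
  induction k generalizing m with
  | nil =>
    match m, h with
    | [b], _ => simp [pvScanB]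
  | cons a ks ih =>
    match m, h with
    | b :: ms, h =>
      have hlen : ms.length = ks.length + 1 := by simpa using h
      by_cases hab : a = b
      · subst hab
        simp only [pvScanB, beq_self_eq_true, if_true]
        rw [← ih ms hlen]
        constructor
        · rintro ⟨i, hi, he⟩
          cases i with
          | zero =>
            simp at he
            exact ⟨0, by omega, by simp [he]⟩
          | succ j =>
            simp at he
            exact ⟨j, by simp at hi; omega, he⟩
        · rintro ⟨j, hj, he⟩
          refine ⟨j + 1, by simp; omega, by simp [he]⟩
      · constructor
        · rintro ⟨i, hi, he⟩
          cases i with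
          | zero =>
            simp at he
            simp [pvScanB, hab, he]
          | succ j =>
            exfalso
            simp at he
            exact hab he.1.symm
        · intro he
          simp only [pvScanB] at he
          rw [if_neg (by simpa using hab)] at he
          simp at he
          exact ⟨0, by simp, by simpa using he.symm⟩

-- bridge A's pyRange/slice loop to the two-pointer scan, under the length guard
lemma pvLoop_eq_scan (k m : List Char) (h : m.length = k.length + 1) :
    ((PySem.List.pyRange 0 (PySem.List.len m) 1).any (fun i =>
      PySem.List.slice m none (some i) ++ PySem.List.slice m (some (i + 1)) none == k))
      = pvScanB k m := by
  have hr : PySem.List.pyRange 0 (PySem.List.len m) 1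
      = List.map (fun j : Nat => (j : Int)) (List.range m.length) := by
    rw [PySem.List.len_eq, PySem.List.pyRange_zero_natCast]
  rw [hr, List.any_map]
  have hstep : ∀ j : Nat,
      ((fun i => PySem.List.slice m none (some i) ++ PySem.List.slice m (some (i + 1)) none == k)
        ∘ (fun j : Nat => (j : Int))) j
      = (m.take j ++ m.drop (j + 1) == k) := by
    intro j
    have hcast : ((j : Int) + 1) = ((j + 1 : Nat) : Int) := by push_cast; ring
    simp only [Function.comp, hcast, PySem.List.slice_to_natCast, PySem.List.slice_from_natCast]
  rcases Bool.eq_false_or_eq_true (pvScanB k m) with hb | hb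
  swap
  · rw [hb, List.any_eq_false]
    intro j hj
    simp only [List.mem_range] at hj
    rw [hstep j]
    simp only [beq_iff_eq]
    intro he
    have : ∃ i < m.length, m.take i ++ m.drop (i + 1) = k := ⟨j, hj, he⟩
    rw [pvDel_iff_scan k m h, hb] at this
    exact absurd this (by simp)
  · rw [hb, List.any_eq_true]
    obtain ⟨j, hj, he⟩ := (pvDel_iff_scan k m h).mpr hb
    exact ⟨j, by simpa using hj, by rw [hstep j]; simp [he]⟩

-- ===== VERDICT (by name: the statement is the Claim_ definition above) =====
theorem kalshi_last_name_matches_py_spec : Claim_equal_kalshi_last_name_matches_py := by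
  intro kalshi_last mlb_last _
  unfold Spec_kalshi_last_name_matches_py
  unfold kalshi_last_name_matches_py kalshi_last_name_matches_py_alt
  set k := pvNormalize kalshi_last with hk
  set m := pvNormalize mlb_last with hm
  by_cases hkm : k = m
  · simp [hkm]
  · by_cases hlen : (PySem.List.len m - PySem.List.len k) = 1
    · have hl : m.length = k.length + 1 := by
        simp only [PySem.List.len_eq] at hlen; omega
      have hloop := pvLoop_eq_scan k m hl
      simp only [PySem.List.len_eq] at hloop hlen
      simp only [PySem.List.len_eq, bne]
      rw [hloop]
      simp [hkm, hlen]
    · simp only [PySem.List.len_eq] at hlen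
      simp [hkm, hlen]
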